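-- pv_equiv track=rewrite | github.com/QuantClaw/QuantClaw | orchestrate_test.py | build_prefix
-- ===== SOURCE A (Python) =====
-- def build_prefix(target_chars=12000):
--     base = (
--         "Consider the following reasoning trace. Goldbach's conjecture claims "
--         "every even integer greater than two is the sum of two primes; while "
--         "unproved, numerical verification holds to extraordinary bounds. The "
--         "twin prime conjecture, in contrast, asserts infinitely many pairs "
--         "(p, p+2) with both prime; Zhang's 2013 bound of seventy million, "
--         "subsequently sharpened by Maynard and the Polymath project, showed "
--         "infinitely many pairs within a finite gap, but the exact gap of two "
--         "remains open. Moving to complexity theory, P versus NP asks whether "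
--         "efficient verification implies efficient search; most researchers "
--         "believe the separation holds, yet natural proofs, relativization, "
--         "and algebrization barriers rule out vast families of attacks. In "
--         "measure theory, Lebesgue integration generalizes Riemann by first "
--         "approximating the codomain rather than the domain, which handles "
--         "pathological functions that Riemann cannot. The dominated "
--         "convergence theorem, Fatou's lemma, and the monotone convergence "
--         "theorem together furnish the core limit-exchange tools. In "
--         "topology, the fundamental group of a space encodes loops up to "
--         "homotopy, and van Kampen's theorem expresses the fundamental "
--         "group of a union in terms of the groups of the parts. Simply "
--         "connected spaces have trivial fundamental group; spheres of "
--         "dimension two and higher qualify, while the circle does not. "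
--     )
--     chunks = []
--     total = 0
--     while total < target_chars:
--         chunks.append(base)
--         total += len(base)
--     return "".join(chunks)
-- ===== SOURCE B (Python) =====
-- def build_prefix(target_chars=12000):
--     base = (
--         "Consider the following reasoning trace. Goldbach's conjecture claims e"
--         'very even integer greater than two is the sum of two primes; while unp'
--         'roved, numerical verification holds to extraordinary bounds. The twin '
--         'prime conjecture, in contrast, asserts infinitely many pairs (p, p+2) '
--         "with both prime; Zhang's 2013 bound of seventy million, subsequently s"
--         'harpened by Maynard and the Polymath project, showed infinitely many p'
--         'airs within a finite gap, but the exact gap of two remains open. Movin'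
--         'g to complexity theory, P versus NP asks whether efficient verificatio'
--         'n implies efficient search; most researchers believe the separation ho'
--         'lds, yet natural proofs, relativization, and algebrization barriers ru'
--         'le out vast families of attacks. In measure theory, Lebesgue integrati'
--         'on generalizes Riemann by first approximating the codomain rather than'
--         ' the domain, which handles pathological functions that Riemann cannot.'
--         " The dominated convergence theorem, Fatou's lemma, and the monotone co"
--         'nvergence theorem together furnish the core limit-exchange tools. In t'
--         'opology, the fundamental group of a space encodes loops up to homotopy'
--         ", and van Kampen's theorem expresses the fundamental group of a union "
--         'in terms of the groups of the parts. Simply connected spaces have triv'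
--         'ial fundamental group; spheres of dimension two and higher qualify, wh'
--         'ile the circle does not. '
--     )
--     return base * -(-target_chars // len(base))
-- ===== Notes on version B (the rewrite author's own statement) =====
-- stated objective: idiomatic
-- what changed: Replaced the accumulate-chunks-and-join while loop by a closed-form integer ceiling division computing the repeat count, returning base * k with no loop or accumulator.
import Mathlib
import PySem

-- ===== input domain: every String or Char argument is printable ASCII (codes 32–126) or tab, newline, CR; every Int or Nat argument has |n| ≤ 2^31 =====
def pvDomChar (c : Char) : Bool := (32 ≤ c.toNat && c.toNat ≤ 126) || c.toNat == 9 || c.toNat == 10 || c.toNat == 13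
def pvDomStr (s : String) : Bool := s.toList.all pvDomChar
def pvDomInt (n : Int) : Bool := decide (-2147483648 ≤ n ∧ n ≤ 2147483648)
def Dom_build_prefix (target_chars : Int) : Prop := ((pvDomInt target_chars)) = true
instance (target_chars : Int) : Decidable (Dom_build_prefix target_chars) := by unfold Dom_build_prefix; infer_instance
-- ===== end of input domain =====

-- B replaces A's accumulate-chunks-and-join while loop by a closed-form integer ceiling division giving the repeat count (base * k); objective: idiomatic.

-- the fixed text both implementations repeat
def pvBase : String := "Consider the following reasoning trace. Goldbach's conjecture claims every even integer greater than two is the sum of two primes; while unproved, numerical verification holds to extraordinary bounds. The twin prime conjecture, in contrast, asserts infinitely many pairs (p, p+2) with both prime; Zhang's 2013 bound of seventy million, subsequently sharpened by Maynard and the Polymath project, showed infinitely many pairs within a finite gap, but the exact gap of two remains open. Moving to complexity theory, P versus NP asks whether efficient verification implies efficient search; most researchers believe the separation holds, yet natural proofs, relativization, and algebrization barriers rule out vast families of attacks. In measure theory, Lebesgue integration generalizes Riemann by first approximating the codomain rather than the domain, which handles pathological functions that Riemann cannot. The dominated convergence theorem, Fatou's lemma, and the monotone convergence theorem together furnish the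 core limit-exchange tools. In topology, the fundamental group of a space encodes loops up to homotopy, and van Kampen's theorem expresses the fundamental group of a union in terms of the groups of the parts. Simply connected spaces have trivial fundamental group; spheres of dimension two and higher qualify, while the circle does not. "

-- needed by the loop port for termination: the repeated text is nonempty
set_option maxRecDepth 8000 in
theorem pvBase_ne_empty : pvBase ≠ "" := by
  intro h
  have := congrArg String.length h
  simp [pvBase] at this

theorem pvBase_len_pos : 0 < PySem.Str.len pvBase := by
  simp only [PySem.Str.len]
  rw [Int.natCast_pos, List.length_pos_iff]
  simpa [String.toList_eq_nil_iff] using pvBase_ne_empty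

-- ===== PORT A =====
-- while total < target_chars: chunks.append(base); total += len(base)
def build_prefix_go (target_chars : Int) (chunks : List String) (total : Int) : List String :=
  if total < target_chars then
    build_prefix_go target_chars (chunks ++ [pvBase]) (total + PySem.Str.len pvBase)
  else chunks
termination_by (target_chars - total).toNat
decreasing_by have := pvBase_len_pos; omega

def build_prefix (target_chars : Int) : String :=
  PySem.Str.join "" (build_prefix_go target_chars [] 0)

-- ===== PORT B =====
-- base * k : Python string repetition is PySem.List.pyRepeat on the character list (exact, including k ≤ 0)
def build_prefix_alt (target_chars : Int) : String :=
  String.ofList (PySem.List.pyRepeat pvBase.toList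
    (-(PySem.Int.floordiv (-target_chars) (PySem.Str.len pvBase))))

-- ===== PRECONDITION & SPEC =====
def Spec_build_prefix (target_chars : Int) (out : String) : Prop := out = build_prefix_alt target_chars
instance (target_chars : Int) (out : String) : Decidable (Spec_build_prefix target_chars out) := by unfold Spec_build_prefix; infer_instance

-- ===== CLAIM (what is proved, stated in full; the proofs are below) =====
def Claim_equal_build_prefix : Prop := ∀ (target_chars : Int), Dom_build_prefix target_chars → Spec_build_prefix target_chars (build_prefix target_chars)

-- ===== LEMMAS AND PROOFS =====

-- the loop appends exactly ceil((target_chars - total)/len(base)) copies of the base text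
theorem build_prefix_go_eq (target_chars total : Int) (chunks : List String) :
    build_prefix_go target_chars chunks total =
      chunks ++ List.replicate
        (-(PySem.Int.floordiv (-(target_chars - total)) (PySem.Str.len pvBase))).toNat pvBase := by
  have hL := pvBase_len_pos
  set L := PySem.Str.len pvBase with hLdef
  set q := -(PySem.Int.floordiv (-(target_chars - total)) L) with hqdef
  have hq : (q - 1) * L < target_chars - total ∧ target_chars - total ≤ q * L :=
    (PySem.Int.neg_floordiv_neg_eq_iff_of_pos hL).mp rfl
  rw [build_prefix_go]
  split_ifs with h
  · rw [build_prefix_go_eq target_chars (total + L) (chunks ++ [pvBase])]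
    have hq' : -(PySem.Int.floordiv (-(target_chars - (total + L))) L) = q - 1 := by
      rw [PySem.Int.neg_floordiv_neg_eq_iff_of_pos hL]
      constructor <;> nlinarith [hq.1, hq.2]
    rw [hq']
    have hge : 1 ≤ q := by nlinarith [hq.2]
    have hsucc : q.toNat = (q - 1).toNat + 1 := by omega
    rw [hsucc, List.replicate_succ, List.append_assoc]
    rfl
  · have hd : target_chars - total ≤ 0 := by omega
    have hqle : q ≤ 0 := by
      by_contra hq1
      exact absurd (lt_of_le_of_lt (mul_nonneg (by omega) (le_of_lt hL)) hq.1) (by omega)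
    have h0 : q.toNat = 0 := by omega
    rw [h0, List.replicate_zero, List.append_nil]
termination_by (target_chars - total).toNat
decreasing_by have := pvBase_len_pos; omega

-- intercalating with the empty separator is flattening
theorem intercalate_nil_flatten (l : List (List Char)) : List.intercalate [] l = l.flatten := by
  induction l with
  | nil => rfl
  | cons a t ih =>
    cases t with
    | nil => simp [List.intercalate]
    | cons b u =>
      simp only [List.intercalate, List.intersperse] at *
      simp_all

-- ===== VERDICT (by name: the statement is the Claim_ definition above) =====
theorem build_prefix_spec : Claim_equal_build_prefix := by
  intro t _
  unfold Spec_build_prefix build_prefix build_prefix_alt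
  rw [build_prefix_go_eq, List.nil_append]
  simp only [Int.sub_zero]
  have hsep : ("" : String).toList = [] := rfl
  simp only [PySem.Str.join, PySem.Chars.join, PySem.List.pyRepeat,
    List.map_replicate, hsep, intercalate_nil_flatten]
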